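-- pv_equiv track=rewrite | github.com/mbelda/GCOM | Practica4/practica4_plantilla.py | mejorada
-- ===== SOURCE A (Python) =====
-- def mejorada(minimos, distancia, t, supDist):
--     nuevoSup = minimos[0][1]
--     sustituido = False
--     for i in range(len(minimos)):
--         if minimos[i][1] > nuevoSup:
--             nuevoSup = minimos[i][1]
--         if minimos[i][1] == supDist and sustituido == False:
--             #Es el mas lejano, lo sustituimos
--             minimos[i] = [t, distancia]
--             sustituido = True
--
--     return minimos, nuevoSup
-- ===== SOURCE B (Python) =====
-- def mejorada(minimos, distancia, t, supDist):
--     # Pass 1: the new supremum is just the max of the second components.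
--     nuevoSup = max(fila[1] for fila in minimos)
--     # Pass 2: replace the FIRST row whose distance equals supDist, in place.
--     for i, fila in enumerate(minimos):
--         if fila[1] == supDist:
--             minimos[i] = [t, distancia]
--             break
--     return minimos, nuevoSup
-- ===== Notes on version B (the rewrite author's own statement) =====
-- stated objective: simpler
-- what changed: A's single loop carrying a running max plus a 'sustituido' flag is split into two plain passes: a max() over the second components, then a first-match replace with break; the flag disappears.
import Mathlib
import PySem

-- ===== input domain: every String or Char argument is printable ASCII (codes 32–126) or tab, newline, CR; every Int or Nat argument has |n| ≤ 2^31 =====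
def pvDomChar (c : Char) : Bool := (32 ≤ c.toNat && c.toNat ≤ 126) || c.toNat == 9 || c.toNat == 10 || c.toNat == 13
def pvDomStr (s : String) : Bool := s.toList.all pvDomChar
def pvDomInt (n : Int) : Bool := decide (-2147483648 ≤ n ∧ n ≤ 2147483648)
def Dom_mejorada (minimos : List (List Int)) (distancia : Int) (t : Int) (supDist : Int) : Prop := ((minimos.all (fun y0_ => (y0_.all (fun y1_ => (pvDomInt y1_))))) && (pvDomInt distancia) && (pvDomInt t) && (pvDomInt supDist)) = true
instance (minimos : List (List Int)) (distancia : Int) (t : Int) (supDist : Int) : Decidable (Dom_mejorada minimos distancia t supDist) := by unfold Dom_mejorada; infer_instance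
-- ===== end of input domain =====

-- B splits A's single flag-carrying loop into two plain passes (max, then first-match replace); return-value equivalence only, though both mutate `minimos` identically in Python.


-- ===== PORT A =====
def mejorada (minimos : List (List Int)) (distancia : Int) (t : Int) (supDist : Int) : List (List Int) × Int :=
  let nuevoSup := PySem.List.pyGetD (PySem.List.pyGetD minimos 0 []) 1 0
  let st := (PySem.List.pyRange 0 (minimos.length : Int) 1).foldl
    (fun (st : List (List Int) × Int × Bool) (i : Int) =>
      let v := PySem.List.pyGetD (PySem.List.pyGetD st.1 i []) 1 0
      let sup := if v > st.2.1 then v else st.2.1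
      if v == supDist && !st.2.2 then
        (PySem.List.pySetD st.1 i [t, distancia], sup, true)
      else (st.1, sup, st.2.2))
    (minimos, nuevoSup, false)
  (st.1, st.2.1)

-- ===== PORT B =====
-- the first-match replacement loop of Source B (enumerate + break), as structural recursion
def replaceFirstB (supDist t distancia : Int) : List (List Int) → List (List Int)
  | [] => []
  | fila :: rest =>
    if PySem.List.pyGetD fila 1 0 == supDist then [t, distancia] :: rest
    else fila :: replaceFirstB supDist t distancia rest

def mejorada_alt (minimos : List (List Int)) (distancia : Int) (t : Int) (supDist : Int) : List (List Int) × Int :=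
  let nuevoSup := (PySem.List.max? (minimos.map (fun fila => PySem.List.pyGetD fila 1 0)) (fun y => y)).getD 0
  (replaceFirstB supDist t distancia minimos, nuevoSup)

-- ===== PRECONDITION & SPEC =====
-- Pre_ excludes exactly the inputs where Python A raises: the empty list (IndexError on minimos[0])
-- and rows shorter than 2 (IndexError on fila[1]).
def Pre_mejorada (minimos : List (List Int)) (distancia : Int) (t : Int) (supDist : Int) : Prop :=
  minimos ≠ [] ∧ ∀ fila ∈ minimos, 2 ≤ fila.length
instance (minimos : List (List Int)) (distancia : Int) (t : Int) (supDist : Int) : Decidable (Pre_mejorada minimos distancia t supDist) := by unfold Pre_mejorada; infer_instance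
def pvWitness_mejorada : List (List Int) × Int × Int × Int := ([[0, 5], [1, 3]], 2, 7, 5)

def Spec_mejorada (minimos : List (List Int)) (distancia : Int) (t : Int) (supDist : Int) (out : List (List Int) × Int) : Prop := out = mejorada_alt minimos distancia t supDist
instance (minimos : List (List Int)) (distancia : Int) (t : Int) (supDist : Int) (out : List (List Int) × Int) : Decidable (Spec_mejorada minimos distancia t supDist out) := by unfold Spec_mejorada; infer_instance

-- ===== CLAIM (what is proved, stated in full; the proofs are below) =====
def Claim_equal_mejorada : Prop := ∀ (minimos : List (List Int)) (distancia : Int) (t : Int) (supDist : Int), Dom_mejorada minimos distancia t supDist → Pre_mejorada minimos distancia t supDist → Spec_mejorada minimos distancia t supDist (mejorada minimos distancia t supDist)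

-- ===== LEMMAS AND PROOFS =====

-- structural characterisation of A's loop body over the still-unvisited suffix
def goA (supDist t distancia : Int) : List (List Int) → Int → Bool → List (List Int) × Int × Bool
  | [], sup, sust => ([], sup, sust)
  | fila :: rest, sup, sust =>
    let v := PySem.List.pyGetD fila 1 0
    let sup' := if v > sup then v else sup
    if v == supDist && !sust then
      let r := goA supDist t distancia rest sup' true
      ([t, distancia] :: r.1, r.2)
    else
      let r := goA supDist t distancia rest sup' sust
      (fila :: r.1, r.2)

lemma loopA (supDist t distancia : Int) (m : List (List Int)) :
    ∀ (pre : List (List Int)) (sup : Int) (sust : Bool),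
    (PySem.List.pyRange (pre.length : Int) ((pre.length : Int) + m.length) 1).foldl
      (fun (st : List (List Int) × Int × Bool) (i : Int) =>
        let v := PySem.List.pyGetD (PySem.List.pyGetD st.1 i []) 1 0
        let sup := if v > st.2.1 then v else st.2.1
        if v == supDist && !st.2.2 then
          (PySem.List.pySetD st.1 i [t, distancia], sup, true)
        else (st.1, sup, st.2.2))
      (pre ++ m, sup, sust)
    = (pre ++ (goA supDist t distancia m sup sust).1, (goA supDist t distancia m sup sust).2) := by
  induction m with
  | nil =>
    intro pre sup sust
    rw [show ((pre.length : Int) + ([] : List (List Int)).length) = (pre.length : Int) by simp,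
        PySem.List.pyRange_one_eq_nil (le_refl _)]
    simp [goA]
  | cons fila rest ih =>
    intro pre sup sust
    rw [PySem.List.pyRange_one_cons (by simp)]
    have hget : PySem.List.pyGetD (pre ++ fila :: rest) ((pre.length : Int)) [] = fila := by
      simp [PySem.List.pyGetD_natCast, List.getD]
    have hset : PySem.List.pySetD (pre ++ fila :: rest) ((pre.length : Int)) [t, distancia]
        = (pre ++ [[t, distancia]]) ++ rest := by
      simp [PySem.List.pySetD_natCast]
    simp only [List.foldl_cons]
    by_cases hc : (PySem.List.pyGetD fila 1 0 == supDist && !sust) = true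
    · have h1 := ih (pre ++ [[t, distancia]])
        (if PySem.List.pyGetD fila 1 0 > sup then PySem.List.pyGetD fila 1 0 else sup) true
      simp only [hget, hc, if_true, hset]
      have hlen : ((pre ++ [[t, distancia]]).length : Int) = (pre.length : Int) + 1 := by simp
      rw [show ((pre.length : Int) + ((fila :: rest).length : Int))
            = ((pre ++ [[t, distancia]]).length : Int) + (rest.length : Int) by
          rw [hlen]; simp only [List.length_cons]; push_cast; ring,
          show (pre.length : Int) + 1 = ((pre ++ [[t, distancia]]).length : Int) by rw [hlen]]
      rw [h1]
      simp [goA, hc]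
    · have h1 := ih (pre ++ [fila])
        (if PySem.List.pyGetD fila 1 0 > sup then PySem.List.pyGetD fila 1 0 else sup) sust
      simp only [hget, hc, if_false, Bool.false_eq_true]
      have hlen : ((pre ++ [fila]).length : Int) = (pre.length : Int) + 1 := by simp
      rw [show ((pre.length : Int) + ((fila :: rest).length : Int))
            = ((pre ++ [fila]).length : Int) + (rest.length : Int) by
          rw [hlen]; simp only [List.length_cons]; push_cast; ring,
          show (pre.length : Int) + 1 = ((pre ++ [fila]).length : Int) by rw [hlen]]
      have : pre ++ fila :: rest = (pre ++ [fila]) ++ rest := by simp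
      rw [this, h1]
      simp [goA, hc]

lemma goA_fst_true (supDist t distancia : Int) (m : List (List Int)) :
    ∀ sup, (goA supDist t distancia m sup true).1 = m := by
  induction m with
  | nil => intro sup; simp [goA]
  | cons fila rest ih => intro sup; simp [goA, ih]

lemma goA_fst_false (supDist t distancia : Int) (m : List (List Int)) :
    ∀ sup, (goA supDist t distancia m sup false).1 = replaceFirstB supDist t distancia m := by
  induction m with
  | nil => intro sup; simp [goA, replaceFirstB]
  | cons fila rest ih =>
    intro sup
    by_cases hc : (PySem.List.pyGetD fila 1 0 == supDist) = true
    · simp [goA, replaceFirstB, hc, goA_fst_true]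
    · simp [goA, replaceFirstB, hc, ih]

lemma if_gt_eq_max (s v : Int) : (if v > s then v else s) = max s v := by
  rw [max_def]; split_ifs <;> omega

lemma goA_snd (supDist t distancia : Int) (m : List (List Int)) :
    ∀ sup sust, (goA supDist t distancia m sup sust).2.1
      = m.foldl (fun s fila => max s (PySem.List.pyGetD fila 1 0)) sup := by
  induction m with
  | nil => intro sup sust; simp [goA]
  | cons fila rest ih =>
    intro sup sust
    by_cases hc : (PySem.List.pyGetD fila 1 0 == supDist && !sust) = true
    · simp [goA, hc, ih, if_gt_eq_max]
    · simp [goA, hc, ih, if_gt_eq_max]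

-- ===== VERDICT (by name: the statement is the Claim_ definition above) =====
theorem mejorada_spec : Claim_equal_mejorada := by
  intro minimos distancia t supDist _hDom hPre
  obtain ⟨hne, -⟩ := hPre
  obtain ⟨x, rest, rfl⟩ := List.exists_cons_of_ne_nil hne
  unfold Spec_mejorada mejorada mejorada_alt
  have hloop := loopA supDist t distancia (x :: rest) [] (PySem.List.pyGetD x 1 0) false
  simp only [List.length_nil, Nat.cast_zero, zero_add, List.nil_append] at hloop
  have hseed : PySem.List.pyGetD (PySem.List.pyGetD (x :: rest) 0 []) 1 0
      = PySem.List.pyGetD x 1 0 := by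
    simp [PySem.List.pyGetD_zero_cons]
  simp only [hseed, hloop]
  simp only [Prod.mk.injEq]
  constructor
  · exact goA_fst_false supDist t distancia (x :: rest) _
  · rw [goA_snd]
    rw [List.map_cons, PySem.List.max?_id_cons]
    simp [List.foldl_map]
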